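-- pv_equiv track=rewrite | github.com/anurag9601/brocode_challenge | 20_dec.py | shift_setence
-- ===== SOURCE A (Python) =====
-- def shift_setence(input_str):
--     split_input_str = input_str.split(" ")
--     current_first_letter = split_input_str[0][0]
--     for i in range(1,len(split_input_str)+1):
--         if(i == len(split_input_str)):
--             i = 0
--         split_word = [*split_input_str[i]]
--         words_first_letter = split_word[0]
--         split_word[0] = current_first_letter
--         split_word = "".join(split_word)
--         split_input_str[i] = split_word
--         current_first_letter = words_first_letter
--     return " ".join(split_input_str)
-- ===== SOURCE B (Python) =====
-- def shift_setence(input_str):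
--     words = input_str.split(" ")
--     firsts = [w[0] for w in words]
--     rotated = [firsts[-1]] + firsts[:-1]
--     return " ".join(r + w[1:] for r, w in zip(rotated, words))
-- ===== Notes on version B (the rewrite author's own statement) =====
-- stated objective: simpler
-- what changed: Gathers all first letters, rotates that list by one, and rebuilds the sentence in a single zip/join pass, instead of threading a carried letter through an index-wrapping loop that splats, mutates and rejoins each word in place.
import Mathlib
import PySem

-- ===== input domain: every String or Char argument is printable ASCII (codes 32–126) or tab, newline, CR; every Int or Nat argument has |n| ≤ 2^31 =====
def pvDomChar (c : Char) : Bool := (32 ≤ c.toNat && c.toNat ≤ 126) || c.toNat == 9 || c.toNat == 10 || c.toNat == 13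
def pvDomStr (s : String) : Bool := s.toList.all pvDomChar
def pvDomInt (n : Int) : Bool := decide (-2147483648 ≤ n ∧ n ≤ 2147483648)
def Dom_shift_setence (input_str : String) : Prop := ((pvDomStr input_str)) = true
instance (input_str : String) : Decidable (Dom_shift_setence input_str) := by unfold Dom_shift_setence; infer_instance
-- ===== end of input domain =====

-- B gathers the first letters, rotates them by one, and rebuilds the sentence in a single
-- zip/join pass, instead of A's in-place mutation loop with a wrapping index (objective: simpler).


-- ===== PORT A =====
-- one iteration of A's for-loop: wrap the index, read the word, remember its first
-- letter, overwrite that letter with the carried one, write the word back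
def shiftStep (st : List (List Char) × Char) (i : Int) : List (List Char) × Char :=
  let j := if i = (st.1.length : Int) then 0 else i
  let splitWord := PySem.List.pyGetD st.1 j []
  let wordsFirstLetter := PySem.List.pyGetD splitWord 0 ' '
  let splitWord' := PySem.List.pySetD splitWord 0 st.2
  (PySem.List.pySetD st.1 j splitWord', wordsFirstLetter)

def shift_setence (input_str : String) : String :=
  let ws := PySem.Chars.splitOn input_str.toList [' ']
  let cur := PySem.List.pyGetD (PySem.List.pyGetD ws 0 []) 0 ' '
  let res := (PySem.List.pyRange 1 ((ws.length : Int) + 1)).foldl shiftStep (ws, cur)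
  String.ofList (PySem.Chars.join [' '] res.1)

-- ===== PORT B =====
def shift_setence_alt (input_str : String) : String :=
  let ws := PySem.Chars.splitOn input_str.toList [' ']
  let firsts := ws.map (fun w => PySem.List.pyGetD w 0 ' ')
  let rotated := PySem.List.pyGetD firsts (-1) ' ' :: PySem.List.slice firsts none (some (-1))
  String.ofList (PySem.Chars.join [' ']
    ((rotated.zip ws).map (fun p => p.1 :: PySem.List.slice p.2 (some 1) none)))

-- ===== PRECONDITION & SPEC =====
-- Pre_ excludes exactly the inputs on which A raises IndexError (some piece of the
-- space-split of input_str is empty); B raises IndexError there too.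
def Pre_shift_setence (input_str : String) : Prop :=
  ∀ w ∈ PySem.Chars.splitOn input_str.toList [' '], w ≠ []
instance (input_str : String) : Decidable (Pre_shift_setence input_str) := by
  unfold Pre_shift_setence; infer_instance
def pvWitness_shift_setence : String := "ab cd"
def Spec_shift_setence (input_str : String) (out : String) : Prop := out = shift_setence_alt input_str
instance (input_str : String) (out : String) : Decidable (Spec_shift_setence input_str out) := by unfold Spec_shift_setence; infer_instance

-- ===== CLAIM (what is proved, stated in full; the proofs are below) =====
def Claim_equal_shift_setence : Prop := ∀ (input_str : String), Dom_shift_setence input_str → Pre_shift_setence input_str → Spec_shift_setence input_str (shift_setence input_str)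

-- ===== LEMMAS AND PROOFS =====

-- the first letter of a (nonempty) word
def firstL (w : List Char) : Char := w.headD ' '

-- what A's loop does to the words after the starting index: each word receives the
-- carried letter, and carries its own first letter on
def shiftWords (c : Char) : List (List Char) → List (List Char)
  | [] => []
  | w :: t => (c :: w.tail) :: shiftWords (firstL w) t

-- the letter carried out of A's loop
def lastF (c : Char) : List (List Char) → Char
  | [] => c
  | w :: t => lastF (firstL w) t

lemma splitOn_go_ne_nil (sep : List Char) :
    ∀ (fuel : Nat) (l cur : List Char) (acc : List (List Char)),
      PySem.Chars.splitOn.go sep fuel l cur acc ≠ [] := by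
  intro fuel
  induction fuel with
  | zero => intro l cur acc; simp [PySem.Chars.splitOn.go]
  | succ n ih =>
      intro l cur acc
      cases l with
      | nil => simp [PySem.Chars.splitOn.go]
      | cons c rest =>
          simp only [PySem.Chars.splitOn.go]
          split_ifs <;> apply ih

lemma splitOn_ne_nil (cs sep : List Char) : PySem.Chars.splitOn cs sep ≠ [] := by
  unfold PySem.Chars.splitOn; apply splitOn_go_ne_nil

lemma getD_append_self {α : Type} (pre suf : List α) (w : α) (d : α) :
    (pre ++ w :: suf).getD pre.length d = w := by
  simp

lemma set_append_self {α : Type} (pre suf : List α) (w v : α) :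
    (pre ++ w :: suf).set pre.length v = pre ++ v :: suf := by
  induction pre with
  | nil => rfl
  | cons a t ih => simp [ih]

lemma pySetD_zero_cons {α : Type} (a : α) (t : List α) (v : α) :
    PySem.List.pySetD (a :: t) 0 v = v :: t := by
  rw [PySem.List.pySetD_of_nonneg _ _ (by norm_num)]; rfl

lemma shiftWords_length (c : Char) (t : List (List Char)) :
    (shiftWords c t).length = t.length := by
  induction t generalizing c with
  | nil => rfl
  | cons w t ih => simp [shiftWords, ih]

-- invariant of A's loop before the final, wrapping step
lemma loop_inv (suf : List (List Char)) :
    ∀ (pre : List (List Char)) (c : Char), (∀ w ∈ suf, w ≠ []) →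
      (PySem.List.pyRange (pre.length : Int) ((pre.length : Int) + (suf.length : Int))).foldl
          shiftStep (pre ++ suf, c)
        = (pre ++ shiftWords c suf, lastF c suf) := by
  induction suf with
  | nil => intro pre c _; simp [shiftWords, lastF, PySem.List.pyRange]
  | cons w t ih =>
      intro pre c hne
      have hw : w ≠ [] := hne w (by simp)
      have hlt : (pre.length : Int) < (pre.length : Int) + ((w :: t).length : Int) := by
        simp only [List.length_cons]; omega
      rw [PySem.List.pyRange_one_cons hlt, List.foldl_cons]
      have hstep : shiftStep (pre ++ w :: t, c) (pre.length : Int)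
          = (pre ++ (c :: w.tail) :: t, firstL w) := by
        have hcond : (pre.length : Int) ≠ (((pre ++ w :: t).length : Nat) : Int) := by
          simp only [List.length_append, List.length_cons]; omega
        simp only [shiftStep, hcond, if_false, PySem.List.pyGetD_natCast,
          PySem.List.pySetD_natCast, getD_append_self, set_append_self]
        cases w with
        | nil => exact absurd rfl hw
        | cons a t' => simp [firstL, pySetD_zero_cons, PySem.List.pyGetD_zero_cons]
      rw [hstep]
      have hass : pre ++ (c :: w.tail) :: t = (pre ++ [c :: w.tail]) ++ t := by simp
      have harith : (pre.length : Int) + ((w :: t).length : Int)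
          = (((pre ++ [c :: w.tail]).length : Nat) : Int) + (t.length : Int) := by
        simp only [List.length_append, List.length_cons, List.length_nil]; omega
      have hstart : (pre.length : Int) + 1 = (((pre ++ [c :: w.tail]).length : Nat) : Int) := by
        simp
      rw [hass, harith, hstart, ih _ (firstL w) (fun x hx => hne x (by simp [hx]))]
      simp [shiftWords, lastF]

-- A's final word list, in closed form
lemma portA_list (w0 : List Char) (rest : List (List Char)) (hw0 : w0 ≠ [])
    (hr : ∀ w ∈ rest, w ≠ []) :
    ((PySem.List.pyRange 1 (((w0 :: rest).length : Int) + 1)).foldl shiftStep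
        (w0 :: rest, PySem.List.pyGetD (PySem.List.pyGetD (w0 :: rest) 0 []) 0 ' ')).1
      = (lastF (firstL w0) rest :: w0.tail) :: shiftWords (firstL w0) rest := by
  have hsplit : PySem.List.pyRange 1 (((w0 :: rest).length : Int) + 1)
      = PySem.List.pyRange 1 ((w0 :: rest).length : Int) ++ [((w0 :: rest).length : Int)] :=
    PySem.List.pyRange_one_succ_right (by simp only [List.length_cons]; omega)
  rw [hsplit, List.foldl_append]
  have hfirst : PySem.List.pyGetD (PySem.List.pyGetD (w0 :: rest) 0 []) 0 ' ' = firstL w0 := by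
    cases w0 with
    | nil => exact absurd rfl hw0
    | cons a t' => simp [firstL, PySem.List.pyGetD_zero_cons]
  have hinv := loop_inv rest [w0] (firstL w0) hr
  have hr1 : PySem.List.pyRange ((([w0] : List (List Char)).length : Nat) : Int)
        ((([w0] : List (List Char)).length : Int) + (rest.length : Int))
      = PySem.List.pyRange 1 ((w0 :: rest).length : Int) := by
    norm_num [add_comm]
  rw [hr1] at hinv
  simp only [List.singleton_append] at hinv
  rw [hfirst, hinv]
  -- the wrapping step i = len(words): word 0 receives the carried letter
  simp only [List.foldl_cons, List.foldl_nil]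
  have hlen : ((((w0 :: shiftWords (firstL w0) rest).length : Nat)) : Int)
      = ((w0 :: rest).length : Int) := by
    simp [shiftWords_length]
  have hcond : ((w0 :: rest).length : Int)
      = (((w0 :: shiftWords (firstL w0) rest).length : Nat) : Int) := hlen.symm
  simp only [shiftStep, hcond]
  cases w0 with
  | nil => exact absurd rfl hw0
  | cons a t' =>
      simp [PySem.List.pyGetD_zero_cons, pySetD_zero_cons, firstL]

-- the carried-out letter is the last word's first letter
lemma lastF_getLast (t : List (List Char)) :
    ∀ c : Char, lastF c t = (c :: t.map firstL).getLast (by simp) := by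
  induction t with
  | nil => intro c; simp [lastF]
  | cons w t ih =>
      intro c
      rw [lastF, ih (firstL w), List.map_cons]
      exact (List.getLast_cons (by simp)).symm

-- B's zip/rotate pass produces exactly A's shifted words
lemma zip_shift (t : List (List Char)) :
    ∀ c : Char,
      (((c :: t.map firstL).dropLast.zip t).map (fun p => p.1 :: p.2.tail))
        = shiftWords c t := by
  induction t with
  | nil => intro c; simp [shiftWords]
  | cons w t ih =>
      intro c
      rw [List.map_cons, List.dropLast_cons₂, List.zip_cons_cons, List.map_cons, shiftWords,
        ih (firstL w)]

-- ===== VERDICT (by name: the statement is the Claim_ definition above) =====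
theorem shift_setence_spec : Claim_equal_shift_setence := by
  intro input_str _ hpre
  unfold Spec_shift_setence
  rcases h : PySem.Chars.splitOn input_str.toList [' '] with _ | ⟨w0, rest⟩
  · exact absurd h (splitOn_ne_nil _ _)
  unfold Pre_shift_setence at hpre
  rw [h] at hpre
  have hw0 : w0 ≠ [] := hpre w0 (by simp)
  have hr : ∀ w ∈ rest, w ≠ [] := fun w hw => hpre w (by simp [hw])
  simp only [shift_setence, shift_setence_alt, h]
  rw [portA_list w0 rest hw0 hr]
  -- B's side
  have hmap : (w0 :: rest).map (fun w => PySem.List.pyGetD w 0 ' ') = (w0 :: rest).map firstL := by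
    apply List.map_congr_left
    intro w hw
    rcases List.exists_cons_of_ne_nil (hpre w hw) with ⟨a, t', rfl⟩
    simp [firstL, PySem.List.pyGetD_zero_cons]
  rw [hmap]
  rw [PySem.List.pyGetD_neg_one _ _ (by simp : (w0 :: rest).map firstL ≠ []),
    PySem.List.slice_to_neg_one]
  have hmap2 : (fun p : Char × List Char => p.1 :: PySem.List.slice p.2 (some 1) none)
      = (fun p : Char × List Char => p.1 :: p.2.tail) := by
    funext p; rw [PySem.List.slice_from_one]
  rw [hmap2]
  refine congrArg String.ofList (congrArg (PySem.Chars.join [' ']) ?_)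
  simp only [List.map_cons, List.zip_cons_cons]
  rw [zip_shift rest (firstL w0)]
  rw [lastF_getLast rest (firstL w0)]
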